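-- pv_equiv track=rewrite | github.com/TotallyReal/compressions | codecs_funcs/encoding_functions.py | separate_binary_blocks
-- ===== SOURCE A (Python) =====
-- def separate_binary(binary_str: str, index):
--     data = []
--     zero_length_bin = binary_str[index: index+4]
--     bit_length_bin = binary_str[index+4: index+8]
--     index += 8
--     while zero_length_bin!='0000' or bit_length_bin!='0000':
--         bit_length = int(bit_length_bin,2)
--         number_bin = binary_str[index: index+bit_length]
--         data.append( (zero_length_bin, bit_length_bin, number_bin) )
--         index += bit_length
--
--         zero_length_bin = binary_str[index: index+4]
--         bit_length_bin = binary_str[index+4: index+8]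
--         index += 8
--
--     return data, index
--
-- def separate_binary_blocks(binary_str:str, num_cols: int, num_rows: int):
--     index = 0
--     rows = []
--     for _ in range(num_rows):
--         row = []
--         for _ in range(num_cols):
--             block, index = separate_binary(binary_str, index)
--             row.append(block)
--         rows.append(row)
--     return rows
-- ===== SOURCE B (Python) =====
-- def separate_binary_blocks(binary_str: str, num_cols: int, num_rows: int):
--     # Three-stage pipeline: tokenize the whole string into a flat stream of
--     # records and None sentinels, then split the stream on sentinels into
--     # blocks, then chunk the block list into rows.
--     total = max(num_rows, 0) * max(num_cols, 0)
--     # Pass 1: tokenize, counting sentinels until `total` block terminators seen.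
--     tokens = []
--     i = 0
--     seen = 0
--     while seen < total:
--         zeros = binary_str[i:i+4]
--         bits = binary_str[i+4:i+8]
--         if zeros == '0000' and bits == '0000':
--             tokens.append(None)
--             seen += 1
--             i += 8
--         else:
--             n = int(bits, 2)
--             tokens.append((zeros, bits, binary_str[i+8:i+8+n]))
--             i += 8 + n
--     # Pass 2: split the token stream on sentinels into blocks.
--     blocks, cur = [], []
--     for t in tokens:
--         if t is None:
--             blocks.append(cur)
--             cur = []
--         else:
--             cur.append(t)
--     # Pass 3: chunk the flat block list into rows.
--     return [blocks[r * num_cols:(r + 1) * num_cols] for r in range(num_rows)]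
-- ===== Notes on version B (the rewrite author's own statement) =====
-- stated objective: alternative
-- what changed: B is a three-stage pipeline: one flat tokenizer loop with no per-block structure emits records and None sentinels while counting sentinels, a second pass splits the token stream on sentinels into blocks, and a third pass chunks the block list into rows by slicing - replacing A's nested rows/cols loops that call a per-block do-while reader and build the 2-D result in place.
import Mathlib
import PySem

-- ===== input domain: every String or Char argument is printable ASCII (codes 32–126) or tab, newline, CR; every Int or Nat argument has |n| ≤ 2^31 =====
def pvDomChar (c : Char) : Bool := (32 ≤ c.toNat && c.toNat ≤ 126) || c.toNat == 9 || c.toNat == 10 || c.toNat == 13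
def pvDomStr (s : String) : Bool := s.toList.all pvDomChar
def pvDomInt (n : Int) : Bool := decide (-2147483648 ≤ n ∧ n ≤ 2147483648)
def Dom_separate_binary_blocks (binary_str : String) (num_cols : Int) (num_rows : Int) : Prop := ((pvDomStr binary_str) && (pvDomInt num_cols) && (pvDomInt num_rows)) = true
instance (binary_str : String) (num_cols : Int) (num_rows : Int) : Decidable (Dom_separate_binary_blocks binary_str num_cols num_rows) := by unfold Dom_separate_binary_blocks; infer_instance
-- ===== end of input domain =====

-- B replaces A's nested rows×cols loops (each calling a per-block do-while reader) by a three-stage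
-- pipeline: one flat tokenizer loop with no per-block structure that emits records and None sentinels
-- while counting sentinels, a pass that splits the token stream on sentinels into blocks, and a pass
-- that chunks the block list into rows by slicing (objective: alternative decomposition, same cost).
-- Equality of RETURN values is claimed on Pre_ (A raises ValueError elsewhere).

-- ===== PORT A =====
-- A works on binary_str.toList; Python slices s[a:b] are PySem.List.slice, int(x, 2) is
-- PySem.Int.ofCharsBase? x 2 (exact), strings are rebuilt with String.ofList.
-- The while loop of separate_binary recurses on a fuel counter; the caller passes fuel
-- length+1, enough for every input admitted by Pre_ (each iteration consumes ≥ 8 chars).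
def sepBinLoopA (l : List Char) (z b : List Char) (i : Int)
    (acc : List (String × String × String)) : Nat → Option (List (String × String × String) × Int)
  | 0 => none
  | fuel + 1 =>
    if z ≠ ['0','0','0','0'] ∨ b ≠ ['0','0','0','0'] then
      match PySem.Int.ofCharsBase? b 2 with
      | none => none            -- int(bit_length_bin, 2) raises ValueError
      | some bl =>
        sepBinLoopA l
          (PySem.List.slice l (some (i + bl)) (some (i + bl + 4)))
          (PySem.List.slice l (some (i + bl + 4)) (some (i + bl + 8)))
          (i + bl + 8)
          (acc ++ [(String.ofList z, String.ofList b,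
                    String.ofList (PySem.List.slice l (some i) (some (i + bl))))]) fuel
    else some (acc, i)

-- separate_binary(binary_str, index)
def sepBinA (l : List Char) (index : Int) (fuel : Nat) :
    Option (List (String × String × String) × Int) :=
  sepBinLoopA l (PySem.List.slice l (some index) (some (index + 4)))
    (PySem.List.slice l (some (index + 4)) (some (index + 8))) (index + 8) [] fuel

-- inner 'for _ in range(num_cols)' loop
def rowLoopA (l : List Char) (index : Int) (fuel : Nat)
    (acc : List (List (String × String × String))) :
    Nat → Option (List (List (String × String × String)) × Int)
  | 0 => some (acc, index)
  | k + 1 =>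
    match sepBinA l index fuel with
    | none => none
    | some (blk, i') => rowLoopA l i' fuel (acc ++ [blk]) k

-- outer 'for _ in range(num_rows)' loop
def rowsLoopA (l : List Char) (cols : Nat) (index : Int) (fuel : Nat)
    (acc : List (List (List (String × String × String)))) :
    Nat → Option (List (List (List (String × String × String))) × Int)
  | 0 => some (acc, index)
  | k + 1 =>
    match rowLoopA l index fuel [] cols with
    | none => none
    | some (row, i') => rowsLoopA l cols i' fuel (acc ++ [row]) k

def separate_binary_blocks (binary_str : String) (num_cols : Int) (num_rows : Int) :
    List (List (List (String × String × String))) :=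
  match rowsLoopA binary_str.toList num_cols.toNat 0 (binary_str.toList.length + 1) []
      num_rows.toNat with
  | some (rows, _) => rows
  | none => []      -- Python raises here; unreachable under Pre_

-- ===== PORT B =====
-- Pass 1 of Source B: the flat tokenizer 'while seen < total' loop.  A token is
-- 'none' (Python None, a sentinel) or 'some record'.  Fuel total+length+1
-- (each record consumes ≥ 8 chars, each sentinel bumps 'seen') is enough under Pre_.
def tokLoopB (l : List Char) (total : Nat) :
    Int → Nat → List (Option (String × String × String)) → Nat →
    Option (List (Option (String × String × String)))
  | _, _, _, 0 => none
  | i, seen, acc, fuel + 1 =>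
    if seen < total then
      if PySem.List.slice l (some i) (some (i + 4)) = ['0','0','0','0'] ∧
          PySem.List.slice l (some (i + 4)) (some (i + 8)) = ['0','0','0','0'] then
        tokLoopB l total (i + 8) (seen + 1) (acc ++ [none]) fuel
      else
        match PySem.Int.ofCharsBase? (PySem.List.slice l (some (i + 4)) (some (i + 8))) 2 with
        | none => none          -- int(bits, 2) raises ValueError
        | some n =>
          tokLoopB l total (i + 8 + n) seen
            (acc ++ [some (String.ofList (PySem.List.slice l (some i) (some (i + 4))),
                           String.ofList (PySem.List.slice l (some (i + 4)) (some (i + 8))),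
                           String.ofList (PySem.List.slice l (some (i + 8)) (some (i + 8 + n))))])
            fuel
    else some acc

-- Pass 2 of Source B: split the token stream on sentinels into blocks.
def splitTokB : List (Option (String × String × String)) →
    List (String × String × String) → List (List (String × String × String)) →
    List (List (String × String × String))
  | [], _, blocks => blocks
  | none :: ts, cur, blocks => splitTokB ts [] (blocks ++ [cur])
  | some t :: ts, cur, blocks => splitTokB ts (cur ++ [t]) blocks

def separate_binary_blocks_alt (binary_str : String) (num_cols : Int) (num_rows : Int) :
    List (List (List (String × String × String))) :=
  -- total = max(num_rows, 0) * max(num_cols, 0)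
  match tokLoopB binary_str.toList (num_rows.toNat * num_cols.toNat) 0 0 []
      (num_rows.toNat * num_cols.toNat + binary_str.toList.length + 1) with
  | none => []      -- Python raises here; unreachable under Pre_
  | some toks =>
    -- Pass 3: chunk the flat block list into rows.
    (PySem.List.pyRange 0 num_rows 1).map
      (fun r => PySem.List.slice (splitTokB toks [] [])
        (some (r * num_cols)) (some ((r + 1) * num_cols)))

-- ===== PRECONDITION & SPEC =====
-- Value of 4 binary digit characters.
def bits4 (cs : List Char) : Nat := cs.foldl (fun a c => 2 * a + (if c = '1' then 1 else 0)) 0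

-- MEMBERSHIP in the block grammar (the input's SHAPE, not a run of either port: it computes no
-- output, only whether a well-formed block starts at position p).  The grammar:
--   block  ::= record* "00000000"
--   record ::= z b num   with z, b four binary digits, not both "0000", and num the next
--              (value of b) characters, fully present inside the string.
-- A length-prefixed grammar has no non-recursive closed form; the fuel argument only bounds the
-- recursion (each record spans ≥ 8 chars, so length+1 steps always suffice).
def chunkEnd (l : List Char) : Nat → Nat → Option Nat
  | 0, _ => none
  | fuel + 1, p =>
    if p + 8 ≤ l.length then
      if ((l.drop p).take 8).all (fun c => c == '0' || c == '1') then
        if (l.drop p).take 8 = ['0','0','0','0','0','0','0','0'] then some (p + 8)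
        else if p + 8 + bits4 ((l.drop (p + 4)).take 4) ≤ l.length then
          chunkEnd l fuel (p + 8 + bits4 ((l.drop (p + 4)).take 4))
        else none
      else none
    else none

def chunkEndN (l : List Char) (p : Nat) : Nat → Option Nat
  | 0 => some p
  | n + 1 =>
    match chunkEnd l (l.length + 1) p with
    | some q => chunkEndN l q n
    | none => none

-- Pre_ admits every input with trivial dimensions, and otherwise the strings whose first
-- num_rows*num_cols blocks follow the strict grammar (4 binary digits per length field, number
-- field fully present).  It excludes malformed strings, on which A raises ValueError (int('',2)
-- or of a non-binary field) or does not terminate, and — conservatively — blocks with exotic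
-- length fields that Python's int(·,2) still accepts (whitespace/sign/underscore/'0b'), on
-- which B returns the same value as A.
def Pre_separate_binary_blocks (binary_str : String) (num_cols : Int) (num_rows : Int) : Prop :=
  num_rows ≤ 0 ∨ num_cols ≤ 0 ∨
    (chunkEndN binary_str.toList 0 (num_rows.toNat * num_cols.toNat)).isSome = true
instance (binary_str : String) (num_cols : Int) (num_rows : Int) : Decidable (Pre_separate_binary_blocks binary_str num_cols num_rows) := by unfold Pre_separate_binary_blocks; infer_instance

def pvWitness_separate_binary_blocks : String × Int × Int := ("000100101100000000", 1, 1)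

def Spec_separate_binary_blocks (binary_str : String) (num_cols : Int) (num_rows : Int) (out : List (List (List (String × String × String)))) : Prop := out = separate_binary_blocks_alt binary_str num_cols num_rows
instance (binary_str : String) (num_cols : Int) (num_rows : Int) (out : List (List (List (String × String × String)))) : Decidable (Spec_separate_binary_blocks binary_str num_cols num_rows out) := by unfold Spec_separate_binary_blocks; infer_instance

-- ===== CLAIM (what is proved, stated in full; the proofs are below) =====
def Claim_equal_separate_binary_blocks : Prop := ∀ (binary_str : String) (num_cols : Int) (num_rows : Int), Dom_separate_binary_blocks binary_str num_cols num_rows → Pre_separate_binary_blocks binary_str num_cols num_rows → Spec_separate_binary_blocks binary_str num_cols num_rows (separate_binary_blocks binary_str num_cols num_rows)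

-- ===== LEMMAS AND PROOFS =====

-- the token stream of a list of blocks: each block's records, then a sentinel
def encodeTok (bs : List (List (String × String × String))) :
    List (Option (String × String × String)) :=
  bs.flatMap (fun blk => blk.map (fun x => some x) ++ [none])

-- rewrite a Python slice whose bounds are a known position and a known width into drop/take
theorem sliceAt {α : Type} (l : List α) (n : Nat) (i : Int) (hi : i = (n : Int)) (k : Nat)
    (j : Int) (hj : j = i + (k : Int)) :
    PySem.List.slice l (some i) (some j) = (l.drop n).take k := by
  subst hi hj
  rw [show ((n : Int) + (k : Int)) = ((n + k : Nat) : Int) by push_cast; ring,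
    PySem.List.slice_natCast]
  congr 1
  omega

-- int(x, 2) on four binary digit characters
theorem ofCharsBase2_bits4 (cs : List Char) (hlen : cs.length = 4)
    (hbin : ∀ c ∈ cs, c = '0' ∨ c = '1') :
    PySem.Int.ofCharsBase? cs 2 = some (bits4 cs : Int) := by
  obtain ⟨a, b, c, d, rfl⟩ : ∃ a b c d, cs = [a, b, c, d] := by
    match cs, hlen with
    | [a, b, c, d], _ => exact ⟨a, b, c, d, rfl⟩
  have ha := hbin a (by simp); have hb := hbin b (by simp)
  have hc := hbin c (by simp); have hd := hbin d (by simp)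
  rcases ha with rfl | rfl <;> rcases hb with rfl | rfl <;> rcases hc with rfl | rfl <;>
    rcases hd with rfl | rfl <;> decide

theorem chunkEnd_lb (l : List Char) (fuel p q : Nat) (h : chunkEnd l (fuel + 1) p = some q) :
    p + 8 ≤ l.length := by
  rw [chunkEnd] at h
  split at h
  · assumption
  · exact absurd h (by simp)

-- once all sentinels were counted, the tokenizer stops with its accumulator
theorem tokDone (l : List Char) (total : Nat) (i : Int) (seen : Nat)
    (acc : List (Option (String × String × String))) (fuel : Nat) (h : total ≤ seen) :
    tokLoopB l total i seen acc (fuel + 1) = some acc := by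
  rw [tokLoopB, if_neg (by omega)]

-- A's reader and B's tokenizer agree, record by record, on a well-formed block
theorem readerEq (l : List Char) :
    ∀ (fuel p q : Nat), chunkEnd l fuel p = some q →
    ∃ blk,
      (∀ acc, sepBinLoopA l ((l.drop p).take 4) ((l.drop (p + 4)).take 4) ((p : Int) + 8) acc fuel
        = some (acc ++ blk, (q : Int))) ∧
      (∀ (total seen extra : Nat) (acc : List (Option (String × String × String))),
        seen < total →
        tokLoopB l total (p : Int) seen acc (blk.length + 1 + extra)
          = tokLoopB l total (q : Int) (seen + 1)
              (acc ++ blk.map (fun x => some x) ++ [none]) extra) ∧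
      p + 8 * blk.length + 8 ≤ q ∧ q ≤ l.length := by
  intro fuel
  induction fuel with
  | zero => intro p q h; exact absurd h (by simp [chunkEnd])
  | succ fuel ih =>
    intro p q h
    have hp8 := chunkEnd_lb l fuel p q h
    rw [chunkEnd, if_pos hp8] at h
    by_cases hbin : (((l.drop p).take 8).all (fun c => c == '0' || c == '1')) = true
    case neg => rw [if_neg hbin] at h; exact absurd h (by simp)
    rw [if_pos hbin] at h
    have hsplit : (l.drop p).take 8 = (l.drop p).take 4 ++ (l.drop (p + 4)).take 4 := by
      rw [show (8 : Nat) = 4 + 4 from rfl, List.take_add, List.drop_drop]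
    have hlz : ((l.drop p).take 4).length = 4 := by simp; omega
    have hlb : ((l.drop (p + 4)).take 4).length = 4 := by simp; omega
    have hslz : PySem.List.slice l (some (p : Int)) (some ((p : Int) + 4)) = (l.drop p).take 4 :=
      sliceAt l p _ rfl 4 _ rfl
    have hslb : PySem.List.slice l (some ((p : Int) + 4)) (some ((p : Int) + 8))
        = (l.drop (p + 4)).take 4 :=
      sliceAt l (p + 4) _ (by push_cast; ring) 4 _ (by push_cast; ring)
    by_cases hz8 : (l.drop p).take 8 = ['0','0','0','0','0','0','0','0']
    · -- sentinel: the block ends here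
      rw [if_pos hz8] at h
      have hq : q = p + 8 := by injection h with h'; omega
      subst hq
      have hz : (l.drop p).take 4 = ['0','0','0','0'] := by
        rw [← List.take_left' (l₂ := (l.drop (p + 4)).take 4) hlz, ← hsplit, hz8]; rfl
      have hb : (l.drop (p + 4)).take 4 = ['0','0','0','0'] := by
        rw [← List.drop_left' (l₂ := (l.drop (p + 4)).take 4) hlz, ← hsplit, hz8]; rfl
      refine ⟨[], fun acc => ?_, fun total seen extra acc hseen => ?_, by simp, hp8⟩
      · rw [sepBinLoopA, if_neg (by simp [hz, hb])]
        simp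
      · rw [show ([] : List (String × String × String)).length + 1 + extra = extra + 1 by
            simp only [List.length_nil]; omega,
          tokLoopB, if_pos hseen, if_pos (by rw [hslz, hslb]; exact ⟨hz, hb⟩)]
        rw [show (p : Int) + 8 = ((p + 8 : Nat) : Int) by push_cast; ring]
        simp
    · -- a record, then the rest of the block
      rw [if_neg hz8] at h
      by_cases hbound : p + 8 + bits4 ((l.drop (p + 4)).take 4) ≤ l.length
      case neg => rw [if_neg hbound] at h; exact absurd h (by simp)
      rw [if_pos hbound] at h
      have hAcond : (l.drop p).take 4 ≠ ['0','0','0','0'] ∨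
          (l.drop (p + 4)).take 4 ≠ ['0','0','0','0'] := by
        by_contra hcc
        push Not at hcc
        exact hz8 (by rw [hsplit, hcc.1, hcc.2]; rfl)
      have hbinb : ∀ c ∈ (l.drop (p + 4)).take 4, c = '0' ∨ c = '1' := by
        intro c hc
        have := List.all_eq_true.mp hbin c (by rw [hsplit]; exact List.mem_append_right _ hc)
        simpa using this
      have hof : PySem.Int.ofCharsBase? ((l.drop (p + 4)).take 4) 2
          = some ((bits4 ((l.drop (p + 4)).take 4) : Nat) : Int) :=
        ofCharsBase2_bits4 _ hlb hbinb
      obtain ⟨blk', hA', hT', hlb', hql⟩ := ih (p + 8 + bits4 ((l.drop (p + 4)).take 4)) q h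
      refine ⟨(String.ofList ((l.drop p).take 4), String.ofList ((l.drop (p + 4)).take 4),
        String.ofList ((l.drop (p + 8)).take (bits4 ((l.drop (p + 4)).take 4)))) :: blk',
        fun acc => ?_, fun total seen extra acc hseen => ?_, by simp; omega, hql⟩
      · rw [sepBinLoopA, if_pos hAcond, hof]
        dsimp only
        rw [sliceAt l (p + 8) ((p : Int) + 8) (by push_cast; ring)
            (bits4 ((l.drop (p + 4)).take 4)) ((p : Int) + 8 + (bits4 ((l.drop (p + 4)).take 4) : Int)) rfl,
          sliceAt l (p + 8 + bits4 ((l.drop (p + 4)).take 4))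
            ((p : Int) + 8 + (bits4 ((l.drop (p + 4)).take 4) : Int)) (by push_cast; ring) 4
            ((p : Int) + 8 + (bits4 ((l.drop (p + 4)).take 4) : Int) + 4) rfl,
          sliceAt l (p + 8 + bits4 ((l.drop (p + 4)).take 4) + 4)
            ((p : Int) + 8 + (bits4 ((l.drop (p + 4)).take 4) : Int) + 4) (by push_cast; ring) 4
            ((p : Int) + 8 + (bits4 ((l.drop (p + 4)).take 4) : Int) + 8) (by push_cast; ring),
          show ((p : Int) + 8 + (bits4 ((l.drop (p + 4)).take 4) : Int) + 8)
              = ((p + 8 + bits4 ((l.drop (p + 4)).take 4) : Nat) : Int) + 8 by push_cast; ring,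
          hA' _]
        simp
      · rw [show ((_ : String × String × String) :: blk').length + 1 + extra
              = (blk'.length + 1 + extra) + 1 by simp; omega,
          tokLoopB, if_pos hseen,
          if_neg (by rw [hslz, hslb]; intro hcc; exact hz8 (by rw [hsplit, hcc.1, hcc.2]; rfl)),
          hslb, hof]
        dsimp only
        rw [hslz]
        rw [sliceAt l (p + 8) ((p : Int) + 8) (by push_cast; ring)
            (bits4 ((l.drop (p + 4)).take 4)) ((p : Int) + 8 + (bits4 ((l.drop (p + 4)).take 4) : Int)) rfl,
          show ((p : Int) + 8 + (bits4 ((l.drop (p + 4)).take 4) : Int))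
              = ((p + 8 + bits4 ((l.drop (p + 4)).take 4) : Nat) : Int) by push_cast; ring,
          hT' total seen extra _ hseen]
        simp

theorem blockEq (l : List Char) (p q : Nat) (h : chunkEnd l (l.length + 1) p = some q) :
    ∃ blk, sepBinA l (p : Int) (l.length + 1) = some (blk, (q : Int)) ∧
      (∀ (total seen extra : Nat) (acc : List (Option (String × String × String))),
        seen < total →
        tokLoopB l total (p : Int) seen acc (blk.length + 1 + extra)
          = tokLoopB l total (q : Int) (seen + 1)
              (acc ++ blk.map (fun x => some x) ++ [none]) extra) ∧
      p + 8 * blk.length + 8 ≤ q ∧ q ≤ l.length := by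
  obtain ⟨blk, hA, hT, hb, hq⟩ := readerEq l (l.length + 1) p q h
  refine ⟨blk, ?_, hT, hb, hq⟩
  rw [sepBinA,
    sliceAt l p (p : Int) rfl 4 ((p : Int) + 4) rfl,
    sliceAt l (p + 4) ((p : Int) + 4) (by push_cast; ring) 4 ((p : Int) + 8) (by push_cast; ring),
    hA []]
  simp

theorem chunkEndN_add (l : List Char) :
    ∀ (m n p : Nat), chunkEndN l p (m + n) =
      match chunkEndN l p m with
      | some t => chunkEndN l t n
      | none => none := by
  intro m
  induction m with
  | zero => intro n p; rw [Nat.zero_add]; rfl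
  | succ m ih =>
    intro n p
    have e : m + 1 + n = (m + n) + 1 := by omega
    rw [e, chunkEndN, chunkEndN]
    cases chunkEnd l (l.length + 1) p with
    | none => rfl
    | some u => exact ih n u

-- n consecutive blocks: A's row loop returns them; B's tokenizer emits their token stream
theorem seqEq (l : List Char) :
    ∀ (n p q : Nat), chunkEndN l p n = some q →
    ∃ bs, bs.length = n ∧
      (∀ acc, rowLoopA l (p : Int) (l.length + 1) acc n = some (acc ++ bs, (q : Int))) ∧
      (∀ (total seen extra : Nat) (acc : List (Option (String × String × String))),
        seen + n ≤ total →
        tokLoopB l total (p : Int) seen acc ((encodeTok bs).length + extra)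
          = tokLoopB l total (q : Int) (seen + n) (acc ++ encodeTok bs) extra) ∧
      p + 8 * (encodeTok bs).length ≤ q ∧ (n ≠ 0 → q ≤ l.length) ∧ (n = 0 → q = p) := by
  intro n
  induction n with
  | zero =>
    intro p q h
    simp only [chunkEndN, Option.some.injEq] at h
    subst h
    exact ⟨[], rfl, fun acc => by simp [rowLoopA],
      fun total seen extra acc _ => by simp [encodeTok],
      by simp [encodeTok], by simp, fun _ => rfl⟩
  | succ n ih =>
    intro p q h
    rw [chunkEndN] at h
    cases hc : chunkEnd l (l.length + 1) p with
    | none => rw [hc] at h; exact absurd h (by simp)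
    | some t =>
      rw [hc] at h
      obtain ⟨blk, hA, hT, hb, htl⟩ := blockEq l p t hc
      obtain ⟨bs', hlen', hrow', htok', hb', hql', hq0'⟩ := ih t q h
      have henc : encodeTok (blk :: bs')
          = (blk.map (fun x => some x) ++ [none]) ++ encodeTok bs' := by
        simp [encodeTok]
      refine ⟨blk :: bs', by simp [hlen'], fun acc => ?_,
        fun total seen extra acc hseen => ?_, ?_, fun _ => ?_, by simp⟩
      · rw [rowLoopA, hA]
        dsimp only
        rw [hrow' (acc ++ [blk])]
        simp
      · rw [henc]
        have e1 : ((blk.map (fun x => some x) ++ [none]) ++ encodeTok bs').length + extra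
              = blk.length + 1 + ((encodeTok bs').length + extra) := by simp; omega
        rw [e1, hT total seen _ acc (by omega),
          htok' total (seen + 1) extra _ (by omega)]
        rw [show seen + 1 + n = seen + (n + 1) by omega]
        simp
      · rw [henc]
        simp only [List.length_append, List.length_map, List.length_cons, List.length_nil]
        omega
      · rcases Nat.eq_zero_or_pos n with rfl | hn
        · rw [hq0' rfl]; exact htl
        · exact hql' (by omega)

-- rows of num_cols blocks: A's rows loop vs B's tokenizer over all R*C blocks
theorem rowsEq (l : List Char) (C : Nat) :
    ∀ (R p q : Nat), chunkEndN l p (R * C) = some q →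
    ∃ rows, rows.length = R ∧ (∀ row ∈ rows, row.length = C) ∧
      (∀ acc, rowsLoopA l C (p : Int) (l.length + 1) acc R = some (acc ++ rows, (q : Int))) ∧
      (∀ (total seen extra : Nat) (acc : List (Option (String × String × String))),
        seen + R * C ≤ total →
        tokLoopB l total (p : Int) seen acc ((encodeTok rows.flatten).length + extra)
          = tokLoopB l total (q : Int) (seen + R * C) (acc ++ encodeTok rows.flatten) extra) ∧
      p + 8 * (encodeTok rows.flatten).length ≤ q ∧ (R * C ≠ 0 → q ≤ l.length) ∧
      (R * C = 0 → q = p) := by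
  intro R
  induction R with
  | zero =>
    intro p q h
    simp only [Nat.zero_mul, chunkEndN, Option.some.injEq] at h
    subst h
    exact ⟨[], rfl, by simp, fun acc => by simp [rowsLoopA],
      fun total seen extra acc _ => by simp [encodeTok],
      by simp [encodeTok], by simp, fun _ => rfl⟩
  | succ R ih =>
    intro p q h
    rw [show (R + 1) * C = C + R * C by ring] at h
    rw [chunkEndN_add] at h
    cases hc : chunkEndN l p C with
    | none => rw [hc] at h; exact absurd h (by simp)
    | some t =>
      rw [hc] at h
      obtain ⟨bs, hbl, hrow, htok, hbb, hqlb, hq0b⟩ := seqEq l C p t hc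
      obtain ⟨rows', hlen', hrl', hrows', htok', hb', hql', hq0'⟩ := ih t q h
      have henc : encodeTok ((bs :: rows').flatten) = encodeTok bs ++ encodeTok rows'.flatten := by
        simp [encodeTok]
      refine ⟨bs :: rows', by simp [hlen'], ?_, fun acc => ?_,
        fun total seen extra acc hseen => ?_, ?_, fun hRC => ?_, fun hRC => ?_⟩
      · intro row hr
        rcases List.mem_cons.mp hr with rfl | hr
        · exact hbl
        · exact hrl' row hr
      · rw [rowsLoopA, hrow []]
        dsimp only
        simp only [List.nil_append]
        rw [hrows' (acc ++ [bs])]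
        simp
      · rw [henc]
        have e1 : (encodeTok bs ++ encodeTok rows'.flatten).length + extra
              = (encodeTok bs).length + ((encodeTok rows'.flatten).length + extra) := by
            simp only [List.length_append]; omega
        have hexp : (R + 1) * C = C + R * C := by ring
        rw [hexp] at hseen
        rw [e1, htok total seen _ acc (by omega),
          htok' total (seen + C) extra _ (by omega)]
        rw [show seen + C + R * C = seen + (R + 1) * C by ring]
        simp
      · rw [henc]
        simp only [List.length_append]
        omega
      · have hC : C ≠ 0 := by
          intro h0; exact hRC (by rw [h0]; ring)
        rcases Nat.eq_zero_or_pos (R * C) with hRC0 | hRCpos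
        · rw [hq0' hRC0]; exact hqlb hC
        · exact hql' (by omega)
      · have hC : C = 0 := by
          rcases Nat.eq_zero_or_pos C with h0 | hpos
          · exact h0
          · exact absurd hRC (by positivity)
        rw [hq0' (by rw [hC]; ring), hq0b hC]

-- splitting the token stream of encoded blocks restores the blocks
theorem splitTok_block (blk : List (String × String × String)) :
    ∀ (ts : List (Option (String × String × String))) cur blocks,
    splitTokB (blk.map (fun x => some x) ++ [none] ++ ts) cur blocks
      = splitTokB ts [] (blocks ++ [cur ++ blk]) := by
  induction blk with
  | nil => intro ts cur blocks; simp [splitTokB]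
  | cons x blk ih =>
    intro ts cur blocks
    simp only [List.map_cons, List.cons_append, splitTokB]
    rw [ih ts (cur ++ [x]) blocks]
    simp

theorem splitTok_encode :
    ∀ (bs : List (List (String × String × String))) blocks,
    splitTokB (encodeTok bs) [] blocks = blocks ++ bs := by
  intro bs
  induction bs with
  | nil => intro blocks; simp [encodeTok, splitTokB]
  | cons blk bs ih =>
    intro blocks
    rw [show encodeTok (blk :: bs) = blk.map (fun x => some x) ++ [none] ++ encodeTok bs by
        simp [encodeTok],
      splitTok_block, ih]
    simp

theorem rowsA_zeroC (l : List Char) (F : Nat) :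
    ∀ (k : Nat) (i : Int) (acc : List (List (List (String × String × String)))),
    rowsLoopA l 0 i F acc k = some (acc ++ List.replicate k [], i) := by
  intro k
  induction k with
  | zero => intro i acc; simp [rowsLoopA]
  | succ k ih =>
    intro i acc
    rw [rowsLoopA, rowLoopA]
    show rowsLoopA l 0 i F (acc ++ [[]]) k = _
    rw [ih i (acc ++ [[]])]
    simp [List.replicate_succ]

theorem flattenChunk {α : Type} (C : Nat) :
    ∀ (rows : List (List α)), (∀ row ∈ rows, row.length = C) →
    (List.range rows.length).map (fun k => ((rows.flatten).drop (k * C)).take C) = rows := by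
  intro rows
  induction rows with
  | nil => intro _; rfl
  | cons row rest ih =>
    intro h
    have hrow : row.length = C := h row (by simp)
    have hrest : ∀ r ∈ rest, r.length = C := fun r hr => h r (by simp [hr])
    simp only [List.length_cons, List.range_succ_eq_map, List.map_cons, List.map_map,
      List.cons.injEq]
    refine ⟨?_, ?_⟩
    · simpa using List.take_left' (l₂ := rest.flatten) hrow
    · conv_rhs => rw [← ih hrest]
      apply List.map_congr_left
      intro k _
      simp only [Function.comp_apply, List.flatten_cons]
      have e : Nat.succ k * C = row.length + k * C := by rw [Nat.succ_mul, hrow, Nat.add_comm]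
      rw [e, List.drop_append, List.drop_eq_nil_of_le (by omega), List.nil_append,
        Nat.add_sub_cancel_left]

theorem chunkMap {α : Type} (rows : List (List α)) (C : Nat) (c r : Int) (hc : c = (C : Int))
    (hrow : ∀ row ∈ rows, row.length = C) (hr : r = (rows.length : Int)) :
    (PySem.List.pyRange 0 r 1).map
      (fun j => PySem.List.slice rows.flatten (some (j * c)) (some ((j + 1) * c))) = rows := by
  subst hc hr
  rw [PySem.List.pyRange_one]
  conv_rhs => rw [← flattenChunk C rows hrow]
  simp only [Int.sub_zero, Int.toNat_natCast, List.map_map]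
  apply List.map_congr_left
  intro k _
  exact sliceAt rows.flatten (k * C) _ (by push_cast; ring) C _ (by push_cast; ring)

theorem pvSliceNil {α : Type} (a b : Int) :
    PySem.List.slice ([] : List α) (some a) (some b) = [] := by
  have h := PySem.List.length_slice ([] : List α) a b
  cases hs : PySem.List.slice ([] : List α) (some a) (some b) with
  | nil => rfl
  | cons x xs => rw [hs] at h; simp [PySem.List.clampIdx] at h; split_ifs at h

-- ===== VERDICT (by name: the statement is the Claim_ definition above) =====
theorem separate_binary_blocks_spec : Claim_equal_separate_binary_blocks := by
  unfold Claim_equal_separate_binary_blocks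
  intro s c r _ hpre
  unfold Spec_separate_binary_blocks separate_binary_blocks separate_binary_blocks_alt
  by_cases hr : r ≤ 0
  · have hrt : r.toNat = 0 := Int.toNat_of_nonpos hr
    rw [hrt, Nat.zero_mul, tokDone s.toList 0 0 0 [] (0 + s.toList.length) (Nat.le_refl 0),
      PySem.List.pyRange_one_eq_nil hr]
    simp [rowsLoopA]
  · push Not at hr
    by_cases hc : c ≤ 0
    · have hct : c.toNat = 0 := Int.toNat_of_nonpos hc
      rw [hct, Nat.mul_zero, rowsA_zeroC, tokDone s.toList 0 0 0 [] (0 + s.toList.length)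
        (Nat.le_refl 0)]
      dsimp only
      rw [show splitTokB [] [] [] = [] from rfl]
      rw [show (List.map
          (fun j => PySem.List.slice ([] : List (List (String × String × String))) (some (j * c))
            (some ((j + 1) * c))) (PySem.List.pyRange 0 r 1))
          = List.map (fun _ => ([] : List (List (String × String × String))))
            (PySem.List.pyRange 0 r 1)
        from List.map_congr_left (fun j _ => pvSliceNil _ _)]
      rw [List.map_const', PySem.List.length_pyRange_one]
      rw [List.nil_append]
      congr 1
      omega
    · push Not at hc
      rcases hpre with h | h | h
      · omega
      · omega
      · obtain ⟨q, hq⟩ := Option.isSome_iff_exists.mp h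
        obtain ⟨rows, hlen, hrl, hA, hT, hb, hql, _⟩ := rowsEq s.toList c.toNat r.toNat 0 q hq
        have hA0 := hA []
        simp only [Nat.cast_zero, List.nil_append] at hA0
        rw [hA0]
        dsimp only
        -- the tokenizer's fuel is large enough: split it as stream length + leftover
        have hRC : r.toNat * c.toNat ≠ 0 := by
          have : 0 < r.toNat := by omega
          have : 0 < c.toNat := by omega
          positivity
        have hlenle : (encodeTok rows.flatten).length ≤ s.toList.length := by
          have := hql hRC
          omega
        have hfuel : r.toNat * c.toNat + s.toList.length + 1
            = (encodeTok rows.flatten).length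
              + (r.toNat * c.toNat + s.toList.length + 1 - (encodeTok rows.flatten).length) := by
          omega
        obtain ⟨e, he⟩ : ∃ e, r.toNat * c.toNat + s.toList.length + 1
            - (encodeTok rows.flatten).length = e + 1 :=
          ⟨r.toNat * c.toNat + s.toList.length - (encodeTok rows.flatten).length, by omega⟩
        have hT0 := hT (r.toNat * c.toNat) 0 (e + 1) [] (by omega)
        simp only [Nat.cast_zero, Nat.zero_add, List.nil_append] at hT0
        rw [hfuel, he, hT0, tokDone s.toList (r.toNat * c.toNat) (q : Int) (r.toNat * c.toNat)
          (encodeTok rows.flatten) e (Nat.le_refl _)]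
        dsimp only
        rw [splitTok_encode rows.flatten [], List.nil_append]
        exact (chunkMap rows c.toNat c r (Int.toNat_of_nonneg (le_of_lt hc)).symm hrl
          (by rw [hlen, Int.toNat_of_nonneg (le_of_lt hr)])).symm
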